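-- pv_equiv track=rewrite | github.com/Faraysz/camera-pong | GUI.Sistem-Pakar-CBR.py | diagnose_disease
-- ===== SOURCE A (Python) =====
-- knowledge_base = [
--     {
--         "id": 1,
--         "gejala": ["demam", "batuk", "sakit tenggorokan", "letih"],
--         "diagnosa": "Flu"
--     },
--     {
--         "id": 2,
--         "gejala": ["demam", "sakit kepala", "nyeri otot", "ruam"],
--         "diagnosa": "Demam Berdarah"
--     },
--     {
--         "id": 3,
--         "gejala": ["demam", "menggigil", "berkeringat", "mual"],
--         "diagnosa": "Malaria"
--     },
--     {
--         "id": 4,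
--         "gejala": ["demam", "mual", "mata kuning", "pusing"],
--         "diagnosa": "Hepatitis"
--     }
-- ]
--
-- def calculate_similarity(gejala_baru, gejala_kasus):
--     return len(set(gejala_baru).intersection(set(gejala_kasus)))
--
-- def diagnose_disease(gejala_baru):
--     best_match = None
--     highest_similarity = 0
--
--     for case in knowledge_base:
--         similarity = calculate_similarity(gejala_baru, case["gejala"])
--         if similarity > highest_similarity:
--             highest_similarity = similarity
--             best_match = case
--
--     if best_match:
--         return best_match["diagnosa"]
--     else:
--         return "Tidak ditemukan kasus yang cocok"
-- ===== SOURCE B (Python) =====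
-- knowledge_base = [
--     {
--         "id": 1,
--         "gejala": ["demam", "batuk", "sakit tenggorokan", "letih"],
--         "diagnosa": "Flu"
--     },
--     {
--         "id": 2,
--         "gejala": ["demam", "sakit kepala", "nyeri otot", "ruam"],
--         "diagnosa": "Demam Berdarah"
--     },
--     {
--         "id": 3,
--         "gejala": ["demam", "menggigil", "berkeringat", "mual"],
--         "diagnosa": "Malaria"
--     },
--     {
--         "id": 4,
--         "gejala": ["demam", "mual", "mata kuning", "pusing"],
--         "diagnosa": "Hepatitis"
--     }
-- ]
--
-- def diagnose_disease(gejala_baru):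
--     scored = [(len(set(gejala_baru) & set(case["gejala"])), case)
--               for case in knowledge_base]
--     scored.sort(key=lambda p: p[0], reverse=True)
--     best_sim, best_case = scored[0]
--     if best_sim == 0:
--         return "Tidak ditemukan kasus yang cocok"
--     return best_case["diagnosa"]
-- ===== Notes on version B (the rewrite author's own statement) =====
-- stated objective: alternative
-- what changed: Replaces A's running-max scan with best_match/highest_similarity accumulators by building a (similarity, case) list, stably sorting it descending by similarity (ties keep knowledge-base order, matching A's earliest-max choice), and reading the front element, with an explicit zero-similarity fallback.
import Mathlib
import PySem

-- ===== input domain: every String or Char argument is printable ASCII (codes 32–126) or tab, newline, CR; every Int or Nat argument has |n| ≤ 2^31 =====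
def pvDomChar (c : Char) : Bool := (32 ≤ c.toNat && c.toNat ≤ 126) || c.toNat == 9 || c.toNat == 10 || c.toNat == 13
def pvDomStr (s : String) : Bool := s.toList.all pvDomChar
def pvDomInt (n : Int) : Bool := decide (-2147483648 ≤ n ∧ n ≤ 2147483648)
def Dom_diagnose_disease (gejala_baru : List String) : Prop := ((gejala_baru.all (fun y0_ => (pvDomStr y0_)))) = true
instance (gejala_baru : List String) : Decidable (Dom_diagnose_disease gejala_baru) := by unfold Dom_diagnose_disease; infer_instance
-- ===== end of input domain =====

-- B replaces A's running-max scan by a build-score-list / stable-descending-sort / pick-front shape (objective: alternative, same cost).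

-- ===== PORT A =====
structure PVCase where
  id : Int
  gejala : List String
  diagnosa : String
deriving DecidableEq, Repr

def knowledge_base : List PVCase :=
  [ ⟨1, ["demam", "batuk", "sakit tenggorokan", "letih"], "Flu"⟩,
    ⟨2, ["demam", "sakit kepala", "nyeri otot", "ruam"], "Demam Berdarah"⟩,
    ⟨3, ["demam", "menggigil", "berkeringat", "mual"], "Malaria"⟩,
    ⟨4, ["demam", "mual", "mata kuning", "pusing"], "Hepatitis"⟩ ]

def calculate_similarity (gejala_baru gejala_kasus : List String) : Nat :=
  (PySem.Set.inter (PySem.Set.ofList gejala_baru) (PySem.Set.ofList gejala_kasus)).length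

def diagnose_disease (gejala_baru : List String) : String :=
  let st := knowledge_base.foldl
    (fun (acc : Option PVCase × Nat) case =>
      let similarity := calculate_similarity gejala_baru case.gejala
      if similarity > acc.2 then (some case, similarity) else acc)
    (none, 0)
  match st.1 with
  | some best_match => best_match.diagnosa
  | none => "Tidak ditemukan kasus yang cocok"

-- ===== PORT B =====
def diagnose_disease_alt (gejala_baru : List String) : String :=
  let scored := knowledge_base.map
    (fun case => ((PySem.Set.inter (PySem.Set.ofList gejala_baru) (PySem.Set.ofList case.gejala)).length, case))
  match PySem.List.sorted scored (fun p => p.1) true with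
  | [] => "Tidak ditemukan kasus yang cocok"   -- unreachable: knowledge_base is nonempty
  | (best_sim, best_case) :: _ =>
      if best_sim = 0 then "Tidak ditemukan kasus yang cocok" else best_case.diagnosa

-- ===== PRECONDITION & SPEC =====
def Spec_diagnose_disease (gejala_baru : List String) (out : String) : Prop := out = diagnose_disease_alt gejala_baru
instance (gejala_baru : List String) (out : String) : Decidable (Spec_diagnose_disease gejala_baru out) := by unfold Spec_diagnose_disease; infer_instance

-- ===== CLAIM (what is proved, stated in full; the proofs are below) =====
def Claim_equal_diagnose_disease : Prop := ∀ (gejala_baru : List String), Dom_diagnose_disease gejala_baru → Spec_diagnose_disease gejala_baru (diagnose_disease gejala_baru)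

-- ===== LEMMAS AND PROOFS =====
theorem key_lemma (s1 s2 s3 s4 : Nat) (c1 c2 c3 c4 : PVCase) :
    (match ([(s1,c1),(s2,c2),(s3,c3),(s4,c4)].foldl
      (fun (acc : Option PVCase × Nat) p =>
        if p.1 > acc.2 then (some p.2, p.1) else acc) (none, 0)).1 with
     | some b => b.diagnosa
     | none => "Tidak ditemukan kasus yang cocok") =
    (match PySem.List.sorted [(s1,c1),(s2,c2),(s3,c3),(s4,c4)] (fun p => p.1) true with
     | [] => "Tidak ditemukan kasus yang cocok"
     | (bs, bc) :: _ => if bs = 0 then "Tidak ditemukan kasus yang cocok" else bc.diagnosa) := by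
  simp only [PySem.List.sorted, List.foldl]
  split_ifs <;>
    repeat
      first
      | rfl
      | (exfalso; omega)
      | omega
      | (simp only [PySem.List.insertBy]; split_ifs <;> simp_all)
      | simp_all

-- ===== VERDICT (by name: the statement is the Claim_ definition above) =====
theorem diagnose_disease_spec : Claim_equal_diagnose_disease := by
  intro g _
  unfold Spec_diagnose_disease diagnose_disease diagnose_disease_alt knowledge_base
  simp only [List.map, List.foldl]
  exact key_lemma _ _ _ _ _ _ _ _
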